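-- pv_equiv track=rewrite | github.com/ggaaggaabbii/University-work | fundamentals of programming/Assigment1/6.py | sum_of_days_between
-- ===== SOURCE A (Python) =====
-- def check_bisect(n):
-- 	if n % 400 == 0 or (n % 100 != 0 and n % 4 == 0):
-- 		return True
-- 	return False
--
-- def sum_of_days_between(a, b):
-- 	Sum = 0
-- 	for i in range(a + 1, b):
-- 		if check_bisect(i):
-- 			Sum += 366
-- 		else:
-- 			Sum += 365
-- 	return Sum
-- ===== SOURCE B (Python) =====
-- def sum_of_days_between(a, b):
--     if b - a <= 1:
--         return 0
--     def leaps_upto(n):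
--         return n // 4 - n // 100 + n // 400
--     return 365 * (b - a - 1) + leaps_upto(b - 1) - leaps_upto(a)
-- ===== Notes on version B (the rewrite author's own statement) =====
-- stated objective: faster
-- what changed: Replaced the per-year loop with a closed form: 365 per year plus the leap-year count difference of the prefix function n//4 - n//100 + n//400.
import Mathlib
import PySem

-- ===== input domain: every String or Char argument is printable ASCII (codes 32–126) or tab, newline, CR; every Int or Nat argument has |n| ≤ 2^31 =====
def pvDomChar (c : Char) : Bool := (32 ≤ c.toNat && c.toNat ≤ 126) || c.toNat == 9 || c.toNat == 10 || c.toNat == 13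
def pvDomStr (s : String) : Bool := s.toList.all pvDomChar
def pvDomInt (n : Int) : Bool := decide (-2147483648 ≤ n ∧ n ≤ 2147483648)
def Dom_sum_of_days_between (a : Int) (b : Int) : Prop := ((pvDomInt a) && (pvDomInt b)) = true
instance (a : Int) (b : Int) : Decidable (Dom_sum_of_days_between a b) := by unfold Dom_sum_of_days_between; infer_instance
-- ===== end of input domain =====

-- B replaces A's per-year loop by an O(1) closed form (365 per year plus a leap-count prefix difference); same value everywhere.

-- ===== PORT A =====
def check_bisect (n : Int) : Bool :=
  if PySem.Int.mod n 400 == 0 || (!(PySem.Int.mod n 100 == 0) && PySem.Int.mod n 4 == 0) then true else false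

def sum_of_days_between (a : Int) (b : Int) : Int :=
  (PySem.List.pyRange (a + 1) b 1).foldl
    (fun Sum i => if check_bisect i then Sum + 366 else Sum + 365) 0

-- ===== PORT B =====
def leaps_upto (n : Int) : Int :=
  PySem.Int.floordiv n 4 - PySem.Int.floordiv n 100 + PySem.Int.floordiv n 400

def sum_of_days_between_alt (a : Int) (b : Int) : Int :=
  if b - a ≤ 1 then 0
  else 365 * (b - a - 1) + leaps_upto (b - 1) - leaps_upto a

-- ===== PRECONDITION & SPEC =====
def Spec_sum_of_days_between (a : Int) (b : Int) (out : Int) : Prop := out = sum_of_days_between_alt a b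
instance (a : Int) (b : Int) (out : Int) : Decidable (Spec_sum_of_days_between a b out) := by unfold Spec_sum_of_days_between; infer_instance

-- ===== CLAIM (what is proved, stated in full; the proofs are below) =====
def Claim_equal_sum_of_days_between : Prop := ∀ (a : Int) (b : Int), Dom_sum_of_days_between a b → Spec_sum_of_days_between a b (sum_of_days_between a b)

-- ===== LEMMAS AND PROOFS =====

-- one loop step adds 365 plus the leap-prefix increment at n
theorem leaps_step (n : Int) :
    leaps_upto n - leaps_upto (n - 1) = (if check_bisect n then 1 else 0) := by
  unfold leaps_upto check_bisect
  rw [PySem.Int.floordiv_eq_ediv_of_pos (b := 4) (by norm_num),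
      PySem.Int.floordiv_eq_ediv_of_pos (b := 100) (by norm_num),
      PySem.Int.floordiv_eq_ediv_of_pos (b := 400) (by norm_num),
      PySem.Int.floordiv_eq_ediv_of_pos (b := 4) (by norm_num),
      PySem.Int.floordiv_eq_ediv_of_pos (b := 100) (by norm_num),
      PySem.Int.floordiv_eq_ediv_of_pos (b := 400) (by norm_num),
      PySem.Int.mod_eq_emod_of_pos (b := 400) (by norm_num),
      PySem.Int.mod_eq_emod_of_pos (b := 100) (by norm_num),
      PySem.Int.mod_eq_emod_of_pos (b := 4) (by norm_num)]
  by_cases a4 : n % 4 = 0 <;> by_cases a100 : n % 100 = 0 <;> by_cases a400 : n % 400 = 0 <;>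
    simp [a4, a100, a400] <;> omega

theorem loop_closed (k : Nat) : ∀ (a s : Int),
    (PySem.List.pyRange a (a + k) 1).foldl
      (fun Sum i => if check_bisect i then Sum + 366 else Sum + 365) s
    = s + 365 * k + leaps_upto (a + k - 1) - leaps_upto (a - 1) := by
  induction k with
  | zero =>
    intro a s
    rw [show a + (0 : Nat) = a by simp, PySem.List.pyRange_one_eq_nil (le_refl a)]
    simp
  | succ k ih =>
    intro a s
    have h1 : a ≤ a + (k : Int) := by omega
    rw [show a + ((k + 1 : Nat) : Int) = (a + k) + 1 by push_cast; ring,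
        PySem.List.pyRange_one_succ_right h1, List.foldl_append, ih]
    rw [show a + (k : Int) + 1 - 1 = a + (k : Nat) by ring]
    have := leaps_step (a + k)
    simp only [List.foldl_cons, List.foldl_nil]
    split_ifs with h <;> simp [h] at this <;> push_cast <;> omega

-- ===== VERDICT (by name: the statement is the Claim_ definition above) =====
theorem sum_of_days_between_spec : Claim_equal_sum_of_days_between := by
  intro a b _
  unfold Spec_sum_of_days_between sum_of_days_between sum_of_days_between_alt
  by_cases h : b - a ≤ 1
  · rw [PySem.List.pyRange_one_eq_nil (by omega : b ≤ a + 1)]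
    simp [h]
  · rw [if_neg h]
    have hc : ((b - a - 1).toNat : Int) = b - a - 1 := by omega
    rw [show PySem.List.pyRange (a + 1) b 1
          = PySem.List.pyRange (a + 1) ((a + 1) + ((b - a - 1).toNat : Int)) 1 by
        congr 1; omega,
      loop_closed, hc,
      show a + 1 + (b - a - 1) - 1 = b - 1 by ring,
      show a + 1 - 1 = a by ring]
    ring
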